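-- pv_equiv track=rewrite | github.com/heroworkshop/advent_of_code | y2022/day_06.py | find_first_unique
-- ===== SOURCE A (Python) =====
-- from collections import deque
--
-- def find_first_unique(entries, length):
--     buffer = deque()
--     for p, ch in enumerate(entries, 1):
--         buffer.append(ch)
--         if len(buffer) > length:
--             buffer. popleft()
--             s = set(buffer)
--             if len(s) == length:
--                 return p
--     return None
-- ===== SOURCE B (Python) =====
-- def find_first_unique(entries, length):
--     counts = {}
--     distinct = 0
--     for i, ch in enumerate(entries):
--         c = counts.get(ch, 0) + 1
--         counts[ch] = c
--         if c == 1: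
--             distinct += 1
--         if i >= length:
--             old = entries[i - length]
--             c2 = counts[old] - 1
--             counts[old] = c2
--             if c2 == 0:
--                 distinct -= 1
--             if distinct == length:
--                 return i + 1
--     return None
-- ===== Notes on version B (the rewrite author's own statement) =====
-- stated objective: faster
-- what changed: Instead of keeping a deque and rebuilding set(buffer) from scratch at every position (an O(length) inner pass), B maintains a sliding-window character-count dict and an incrementally updated count of distinct characters, so each step does O(1) dict work.
-- outside the precondition, e.g. on find_first_unique('abc', -1): A returns None, B raises KeyError
import Mathlib
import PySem

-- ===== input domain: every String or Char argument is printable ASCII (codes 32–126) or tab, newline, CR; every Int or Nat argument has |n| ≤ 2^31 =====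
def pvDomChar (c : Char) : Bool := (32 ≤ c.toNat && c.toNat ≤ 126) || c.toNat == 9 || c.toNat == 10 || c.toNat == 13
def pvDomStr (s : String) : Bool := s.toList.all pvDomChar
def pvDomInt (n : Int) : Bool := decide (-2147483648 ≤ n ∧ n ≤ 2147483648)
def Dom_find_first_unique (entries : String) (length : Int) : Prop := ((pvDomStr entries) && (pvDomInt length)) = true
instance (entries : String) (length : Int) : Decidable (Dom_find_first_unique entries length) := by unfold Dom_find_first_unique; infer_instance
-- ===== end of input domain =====

-- B replaces A's per-step rebuild of set(buffer) by a sliding-window character-count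
-- dict with an incrementally maintained distinct counter (measurably faster at large sizes).

-- ===== PORT A =====
def goA (length : Int) : List Char → Int → List Char → Option Int
  | [], _, _ => none
  | ch :: rest, p, buffer =>
    let buf := buffer ++ [ch]
    if (buf.length : Int) > length then
      let buf2 := buf.drop 1
      let s : PySem.Set Char := PySem.Set.ofList buf2
      if (s.length : Int) = length then some p
      else goA length rest (p + 1) buf2
    else goA length rest (p + 1) buf

def find_first_unique (entries : String) (length : Int) : Option Int :=
  goA length entries.toList 1 []

-- ===== PORT B =====
def goB (entries : List Char) (length : Int) : List Char → Int → PySem.Dict Char Int → Int → Option Int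
  | [], _, _, _ => none
  | ch :: rest, i, counts, distinct =>
    let c := counts.getD ch 0 + 1
    let counts1 := counts.insert ch c
    let distinct1 := if c = 1 then distinct + 1 else distinct
    if i ≥ length then
      match PySem.List.pyGet? entries (i - length) with
      | none => none
      | some old =>
        let c2 := counts1.getD old 0 - 1
        let counts2 := counts1.insert old c2
        let distinct2 := if c2 = 0 then distinct1 - 1 else distinct1
        if distinct2 = length then some (i + 1)
        else goB entries length rest (i + 1) counts2 distinct2
    else goB entries length rest (i + 1) counts1 distinct1

def find_first_unique_alt (entries : String) (length : Int) : Option Int :=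
  goB entries.toList length entries.toList 0 PySem.Dict.empty 0

-- ===== PRECONDITION & SPEC =====
-- Pre_ excludes negative window lengths, a degenerate input on which A returns None while
-- B's natural window-shrink lookup raises an Index/KeyError.
def Pre_find_first_unique (entries : String) (length : Int) : Prop := 0 ≤ length
instance (entries : String) (length : Int) : Decidable (Pre_find_first_unique entries length) := by unfold Pre_find_first_unique; infer_instance
def pvWitness_find_first_unique : String × Int := ("mjqjpqmgbljsphdztnvjfqwrcgsmlb", 4)

def Spec_find_first_unique (entries : String) (length : Int) (out : Option Int) : Prop := out = find_first_unique_alt entries length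
instance (entries : String) (length : Int) (out : Option Int) : Decidable (Spec_find_first_unique entries length out) := by unfold Spec_find_first_unique; infer_instance

-- ===== CLAIM (what is proved, stated in full; the proofs are below) =====
def Claim_equal_find_first_unique : Prop := ∀ (entries : String) (length : Int), Dom_find_first_unique entries length → Pre_find_first_unique entries length → Spec_find_first_unique entries length (find_first_unique entries length)

-- ===== LEMMAS AND PROOFS =====

lemma ofList_length_eq_card (xs : List Char) :
    (PySem.Set.ofList xs).length = xs.toFinset.card := by
  have h1 : (PySem.Set.ofList xs).toFinset.card = (PySem.Set.ofList xs).length :=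
    List.toFinset_card_of_nodup (PySem.Set.nodup_ofList xs)
  have h2 : (PySem.Set.ofList xs).toFinset = xs.toFinset := by
    ext a; simp [List.mem_toFinset, PySem.Set.mem_ofList]
  rw [← h1, h2]

lemma nd_cons (x : Char) (t : List Char) :
    (PySem.Set.ofList (x :: t)).length = (PySem.Set.ofList t).length + (if x ∈ t then 0 else 1) := by
  rw [ofList_length_eq_card, ofList_length_eq_card, List.toFinset_cons]
  by_cases h : x ∈ t
  · simp [h, Finset.insert_eq_self.2 (List.mem_toFinset.2 h)]
  · rw [Finset.card_insert_of_notMem (by simpa using h)]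
    simp [h]

lemma nd_append (t : List Char) (x : Char) :
    (PySem.Set.ofList (t ++ [x])).length = (PySem.Set.ofList t).length + (if x ∈ t then 0 else 1) := by
  rw [ofList_length_eq_card, ofList_length_eq_card]
  have : (t ++ [x]).toFinset = insert x t.toFinset := by
    ext a; simp
  rw [this]
  by_cases h : x ∈ t
  · simp [h, Finset.insert_eq_self.2 (List.mem_toFinset.2 h)]
  · rw [Finset.card_insert_of_notMem (by simpa using h)]
    simp [h]

lemma go_eq (entries : List Char) (L : Nat) :
    ∀ (rest pre : List Char) (counts : PySem.Dict Char Int) (distinct : Int),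
      entries = pre ++ rest →
      (∀ x : Char, counts.getD x 0 = ((pre.drop (pre.length - L)).count x : Int)) →
      distinct = ((PySem.Set.ofList (pre.drop (pre.length - L))).length : Int) →
      goA (L : Int) rest ((pre.length : Int) + 1) (pre.drop (pre.length - L))
        = goB entries (L : Int) rest (pre.length : Int) counts distinct := by
  intro rest
  induction rest with
  | nil => intro pre counts distinct _ _ _; simp [goA, goB]
  | cons ch rs ih =>
    intro pre counts distinct he hc hd
    have hn : pre.length = pre.length := rfl
    set n := pre.length with hndef
    set buffer := pre.drop (n - L) with hbdef
    have hblen : buffer.length = n - (n - L) := by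
      simp [hbdef, hndef]
    -- invariants after the add step
    have hc1 : ∀ x : Char, (counts.insert ch (counts.getD ch 0 + 1)).getD x 0
        = ((buffer ++ [ch]).count x : Int) := by
      intro x
      rw [PySem.Dict.getD_insert]
      by_cases hx : x = ch
      · subst hx
        simp [hc x, List.count_append]
      · simp [hx, hc x, List.count_append, Ne.symm hx]
    have hd1 : (if counts.getD ch 0 + 1 = 1 then distinct + 1 else distinct)
        = ((PySem.Set.ofList (buffer ++ [ch])).length : Int) := by
      rw [hc ch, nd_append, hd]
      by_cases hm : ch ∈ buffer
      · have : (buffer.count ch : Int) + 1 ≠ 1 := by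
          have := List.count_pos_iff.2 hm
          omega
        simp [this, hm]
      · have : (buffer.count ch : Int) + 1 = 1 := by
          rw [List.count_eq_zero.2 hm]; simp
        simp [this, hm]
    simp only [goA, goB]
    by_cases hnL : L ≤ n
    · -- window is full: both sides pop/shrink
      have hblenL : buffer.length = L := by omega
      have hcondA : ((buffer ++ [ch]).length : Int) > (L : Int) := by
        simp [List.length_append, hblenL]
      have hcondB : (n : Int) ≥ (L : Int) := by exact_mod_cast hnL
      rw [if_pos hcondA, if_pos hcondB]
      obtain ⟨o, t, hot⟩ : ∃ o t, buffer ++ [ch] = o :: t := by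
        cases buffer with
        | nil => exact ⟨ch, [], rfl⟩
        | cons b bs => exact ⟨b, bs ++ [ch], rfl⟩
      -- the element Python reads at entries[i - length] is the window head o
      have hidx : PySem.List.pyGet? entries ((n : Int) - (L : Int)) = some o := by
        have hcast : (n : Int) - (L : Int) = ((n - L : Nat) : Int) := by omega
        rw [hcast, PySem.List.pyGet?_natCast]
        have hdrop : entries.drop (n - L) = buffer ++ ch :: rs := by
          rw [he, hbdef, hndef, List.drop_append_of_le_length (by omega)]
        have h0 : entries[(n - L)]? = (entries.drop (n - L))[0]? := by
          rw [List.getElem?_drop]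
          norm_num
        rw [h0, hdrop]
        cases hbuf : buffer with
        | nil =>
          rw [hbuf] at hot
          simp at hot
          simp [hot.1]
        | cons b bs =>
          rw [hbuf] at hot
          simp at hot
          simp [hot.1]
      rw [hidx]
      -- pop-step invariants
      have hto : (buffer ++ [ch]).count o = t.count o + 1 := by
        rw [hot]; simp [List.count_cons_self]
      have hc2 : ∀ x : Char,
          ((counts.insert ch (counts.getD ch 0 + 1)).insert o
            ((counts.insert ch (counts.getD ch 0 + 1)).getD o 0 - 1)).getD x 0
          = (t.count x : Int) := by
        intro x
        rw [PySem.Dict.getD_insert]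
        by_cases hx : x = o
        · subst hx
          rw [if_pos rfl, hc1 x, hto]
          push_cast; ring
        · rw [if_neg hx, hc1 x, hot, List.count_cons, if_neg (by simpa using Ne.symm hx)]
          simp
      have hc2o : (counts.insert ch (counts.getD ch 0 + 1)).getD o 0 - 1 = (t.count o : Int) := by
        rw [hc1 o, hto]; push_cast; ring
      have hd2 :
          (if (counts.insert ch (counts.getD ch 0 + 1)).getD o 0 - 1 = 0
            then (if counts.getD ch 0 + 1 = 1 then distinct + 1 else distinct) - 1
            else (if counts.getD ch 0 + 1 = 1 then distinct + 1 else distinct))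
          = ((PySem.Set.ofList t).length : Int) := by
        rw [hc2o, hd1, hot, nd_cons]
        by_cases hm : o ∈ t
        · simp [hm, (List.count_pos_iff.2 hm).ne']
        · simp [hm, List.count_eq_zero.2 hm]
      -- new window after the slide
      have htw : t = (pre ++ [ch]).drop ((pre ++ [ch]).length - L) := by
        have h1 : buffer ++ [ch] = (pre ++ [ch]).drop (n - L) := by
          rw [hbdef, List.drop_append_of_le_length (by omega)]
        have h2 : t = (buffer ++ [ch]).drop 1 := by rw [hot]; simp
        rw [h2, h1, List.drop_drop, List.length_append]
        congr 1
        simp [hndef]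
        omega
      simp only [hot, List.drop_one, List.tail_cons]
      rw [hd2]
      by_cases hfin : ((PySem.Set.ofList t).length : Int) = (L : Int)
      · rw [if_pos hfin, if_pos hfin]
      · rw [if_neg hfin, if_neg hfin]
        have := ih (pre ++ [ch])
          ((counts.insert ch (counts.getD ch 0 + 1)).insert o
            ((counts.insert ch (counts.getD ch 0 + 1)).getD o 0 - 1))
          ((PySem.Set.ofList t).length : Int)
          (by rw [he]; simp)
          (by intro x; rw [hc2 x, ← htw])
          (by rw [← htw])
        rw [← htw] at this
        simpa [List.length_append, add_assoc] using this
    · -- window not yet full: no pop on either side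
      have hb_pre : buffer = pre := by
        rw [hbdef]
        have : n - L = 0 := by omega
        rw [this, List.drop_zero]
      have hcondA : ¬ (((buffer ++ [ch]).length : Int) > (L : Int)) := by
        have : buffer.length + 1 ≤ L := by omega
        simp [List.length_append]
        exact_mod_cast this
      have hcondB : ¬ ((n : Int) ≥ (L : Int)) := by
        simp
        exact_mod_cast Nat.lt_of_not_le hnL
      rw [if_neg hcondA, if_neg hcondB]
      have hnw : buffer ++ [ch] = (pre ++ [ch]).drop ((pre ++ [ch]).length - L) := by
        rw [hb_pre, List.length_append]
        have : n + 1 - L = 0 := by omega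
        simp [hndef] at this
        rw [show pre.length + [ch].length - L = 0 by simpa using this, List.drop_zero]
      have := ih (pre ++ [ch])
        (counts.insert ch (counts.getD ch 0 + 1))
        ((PySem.Set.ofList (buffer ++ [ch])).length : Int)
        (by rw [he]; simp)
        (by intro x; rw [hc1 x, ← hnw])
        (by rw [← hnw])
      rw [← hnw] at this
      rw [hd1]
      simpa [List.length_append, add_assoc] using this

-- ===== VERDICT (by name: the statement is the Claim_ definition above) =====
theorem find_first_unique_spec : Claim_equal_find_first_unique := by
  intro entries length _ hpre
  unfold Spec_find_first_unique find_first_unique find_first_unique_alt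
  obtain ⟨L, rfl⟩ : ∃ L : Nat, (L : Int) = length := ⟨length.toNat, Int.toNat_of_nonneg hpre⟩
  have h := go_eq entries.toList L entries.toList [] PySem.Dict.empty 0 rfl
    (by intro x; simp [PySem.Dict.getD, PySem.Dict.get?, PySem.Dict.empty]) (by simp [PySem.Set.ofList])
  simpa using h
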